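-- pv_equiv track=rewrite | github.com/gimgyuwon/Algorithm | 백준/Bronze/8958. OX퀴즈/OX퀴즈.py | calc_ox_score
-- ===== SOURCE A (Python) =====
-- def calc_ox_score(ans_lst):
--     score = 0
--     stack = 0
--     for ans in ans_lst:
--         if ans == 'O':
--             stack += 1
--             score += stack
--         else:
--             stack = 0
--     return score
-- ===== SOURCE B (Python) =====
-- def calc_ox_score(ans_lst):
--     # score = number of contiguous all-'O' segments: for each end index i,
--     # count the consecutive 'O's extending backwards from i.
--     total = 0
--     for i in range(len(ans_lst)):
--         j = i
--         while j >= 0 and ans_lst[j] == 'O':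
--             total += 1
--             j -= 1
--     return total
-- ===== Notes on version B (the rewrite author's own statement) =====
-- stated objective: alternative
-- what changed: B counts all contiguous all-'O' segments by a nested backward scan from every end index (score = number of such segments), instead of A's single-pass incremental streak accumulator.
import Mathlib
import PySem

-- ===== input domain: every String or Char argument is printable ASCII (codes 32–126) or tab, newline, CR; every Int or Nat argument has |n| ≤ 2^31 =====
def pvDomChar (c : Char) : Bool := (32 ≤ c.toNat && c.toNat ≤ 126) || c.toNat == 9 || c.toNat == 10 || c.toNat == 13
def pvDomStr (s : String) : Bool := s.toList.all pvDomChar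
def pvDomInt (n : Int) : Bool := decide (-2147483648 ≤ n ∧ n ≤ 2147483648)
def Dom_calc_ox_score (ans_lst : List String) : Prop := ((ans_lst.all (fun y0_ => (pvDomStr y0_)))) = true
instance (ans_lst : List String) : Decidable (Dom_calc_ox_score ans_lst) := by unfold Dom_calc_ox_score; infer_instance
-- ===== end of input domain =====

-- B counts contiguous all-'O' segments by a nested backward scan from each end index,
-- instead of A's single-pass incremental streak accumulator (objective: alternative).


-- ===== PORT A =====
-- score = 0; stack = 0; for ans: if ans == 'O': stack += 1; score += stack else stack = 0
def calc_ox_score (ans_lst : List String) : Int :=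
  (ans_lst.foldl
    (fun (st : Int × Int) ans =>
      if ans == "O" then (st.1 + (st.2 + 1), st.2 + 1) else (st.1, 0))
    (0, 0)).1

-- ===== PORT B =====
-- inner while loop: j starts at i, counts while j >= 0 and ans_lst[j] == 'O', decrementing j.
-- pvBack l k = number of iterations with j starting at k - 1 (k = j + 1; k = 0 means j = -1).
def pvBack (l : List String) : Nat → Int
  | 0 => 0
  | (k + 1) => if PySem.List.pyGet? l (k : Int) = some "O" then 1 + pvBack l k else 0

-- for i in range(len(ans_lst)): total += <inner while count starting at j = i>
def calc_ox_score_alt (ans_lst : List String) : Int :=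
  (List.range ans_lst.length).foldl (fun total i => total + pvBack ans_lst (i + 1)) 0

-- ===== PRECONDITION & SPEC =====
def Spec_calc_ox_score (ans_lst : List String) (out : Int) : Prop := out = calc_ox_score_alt ans_lst
instance (ans_lst : List String) (out : Int) : Decidable (Spec_calc_ox_score ans_lst out) := by unfold Spec_calc_ox_score; infer_instance

-- ===== CLAIM (what is proved, stated in full; the proofs are below) =====
def Claim_equal_calc_ox_score : Prop := ∀ (ans_lst : List String), Dom_calc_ox_score ans_lst → Spec_calc_ox_score ans_lst (calc_ox_score ans_lst)

-- ===== LEMMAS AND PROOFS =====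

-- pvBack only looks at indices < k, so appending an element does not change it
theorem pvBack_append (l : List String) (a : String) :
    ∀ k, k ≤ l.length → pvBack (l ++ [a]) k = pvBack l k := by
  intro k
  induction k with
  | zero => intro _; rfl
  | succ k ih =>
    intro hk
    have hlt : k < l.length := by omega
    simp only [pvBack, PySem.List.pyGet?_natCast, List.getElem?_append_left hlt,
      ih (Nat.le_of_lt hlt)]

-- accumulator form of B's fold
theorem foldl_add_map (f : Nat → Int) (xs : List Nat) (a : Int) :
    xs.foldl (fun acc i => acc + f i) a = a + (xs.map f).sum := by
  induction xs generalizing a with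
  | nil => simp
  | cons x t ih => simp only [List.foldl_cons, List.map_cons, List.sum_cons, ih]; ring

-- characterisation of A's fold: score = sum of backward run lengths, stack = run ending at the end
theorem A_fold_char (l : List String) :
    l.foldl (fun (st : Int × Int) ans =>
        if ans == "O" then (st.1 + (st.2 + 1), st.2 + 1) else (st.1, 0)) (0, 0)
      = (((List.range l.length).map (fun i => pvBack l (i + 1))).sum, pvBack l l.length) := by
  induction l using List.reverseRecOn with
  | nil => rfl
  | append_singleton l a ih =>
    rw [List.foldl_append, ih]
    have hmap : (List.range l.length).map (fun i => pvBack (l ++ [a]) (i + 1))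
        = (List.range l.length).map (fun i => pvBack l (i + 1)) := by
      apply List.map_congr_left
      intro i hi
      exact pvBack_append l a (i + 1) (by simpa using List.mem_range.mp hi)
    have hlast : pvBack (l ++ [a]) (l.length + 1)
        = if a == "O" then 1 + pvBack l l.length else 0 := by
      simp only [pvBack, PySem.List.pyGet?_natCast, List.getElem?_append_right (le_refl _),
        Nat.sub_self, List.getElem?_cons_zero, pvBack_append l a l.length (le_refl _)]
      by_cases h : a = "O" <;> simp [h]
    simp only [List.length_append, List.length_singleton, List.range_succ, List.map_append,
      List.sum_append, List.map_cons, List.map_nil, List.sum_cons, List.sum_nil, hmap, hlast]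
    by_cases h : a = "O" <;> simp [h] <;> ring

-- ===== VERDICT (by name: the statement is the Claim_ definition above) =====
theorem calc_ox_score_spec : Claim_equal_calc_ox_score := by
  intro l _
  unfold Spec_calc_ox_score calc_ox_score calc_ox_score_alt
  rw [A_fold_char, foldl_add_map (fun i => pvBack l (i + 1)) (List.range l.length) 0]
  simp
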